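-- pv_equiv track=rewrite | github.com/EmmaLeonhart/shintowiki-scripts | shinto_miraheze/normalize_category_pages.py | extract_top_level_templates
-- ===== SOURCE A (Python) =====
-- def dedupe_preserve_order(items):
--     seen = set()
--     out = []
--     for item in items:
--         key = item.strip()
--         if key in seen:
--             continue
--         seen.add(key)
--         out.append(item.strip())
--     return out
--
-- def extract_top_level_templates(text):
--     templates = []
--     depth = 0
--     start = None
--     i = 0
--
--     while i < len(text):
--         two = text[i:i + 2]
--         if two == "{{":
--             if depth == 0:
--                 start = i
--             depth += 1
--             i += 2
--             continue
--         if two == "}}" and depth > 0: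
--             depth -= 1
--             i += 2
--             if depth == 0 and start is not None:
--                 block = text[start:i].strip()
--                 if block:
--                     templates.append(block)
--                 start = None
--             continue
--         i += 1
--
--     return dedupe_preserve_order(templates)
-- ===== SOURCE B (Python) =====
-- def extract_top_level_templates(text):
--     # Find-jump algorithm: locate each top-level "{{" with str.find, then find its
--     # matching "}}" by jumping between the next "{{" and next "}}" occurrences.
--     blocks = []
--     i = 0
--     while True:
--         open_pos = text.find("{{", i)
--         if open_pos == -1:
--             break
--         depth = 1
--         j = open_pos + 2
--         while depth:
--             c = text.find("}}", j)
--             if c == -1: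
--                 break
--             o = text.find("{{", j)
--             if o != -1 and o < c:
--                 depth += 1
--                 j = o + 2
--             else:
--                 depth -= 1
--                 j = c + 2
--         if depth:
--             break
--         blocks.append(text[open_pos:j].strip())
--         i = j
--     return list(dict.fromkeys(blocks))
-- ===== Notes on version B (the rewrite author's own statement) =====
-- stated objective: faster
-- what changed: Replaces A's char-by-char scan (two-char slice test at every index, depth counter over all positions, set-plus-list dedupe) by a find-jump matcher: str.find locates each top-level '{{' directly, a nested find-jump loop hops only between brace-token occurrences to locate the matching '}}', and dedup is dict.fromkeys; B never visits text between tokens character by character.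
import Mathlib
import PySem

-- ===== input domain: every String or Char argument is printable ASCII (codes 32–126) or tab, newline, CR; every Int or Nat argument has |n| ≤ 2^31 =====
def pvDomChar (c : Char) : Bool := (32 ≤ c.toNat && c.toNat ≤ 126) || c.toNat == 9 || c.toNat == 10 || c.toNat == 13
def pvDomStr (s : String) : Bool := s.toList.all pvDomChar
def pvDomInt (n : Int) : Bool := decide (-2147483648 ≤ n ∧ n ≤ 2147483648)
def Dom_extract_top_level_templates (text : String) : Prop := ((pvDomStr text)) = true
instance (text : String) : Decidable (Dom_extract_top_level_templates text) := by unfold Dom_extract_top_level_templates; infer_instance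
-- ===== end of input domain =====

-- B replaces A's char-by-char positional scan by a find-jump matcher (str.find hops
-- between brace-token occurrences) with dict.fromkeys dedup; measured faster (constant factor).

-- ===== PORT A =====
-- helper dedupe_preserve_order: the Python for-loop over items, carrying (seen, out).
def pvDedupeLoopA (items : List String) (seen : PySem.Set String) (out : List String) : List String :=
  match items with
  | [] => out
  | item :: rest =>
    let key := PySem.Str.strip item
    if PySem.Set.contains seen key then
      pvDedupeLoopA rest seen out
    else
      pvDedupeLoopA rest (PySem.Set.add seen key) (out ++ [PySem.Str.strip item])

def dedupe_preserve_order (items : List String) : List String :=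
  pvDedupeLoopA items PySem.Set.empty []

-- the while-loop of A, step for step; text[i:i+2] and text[start:i] are PySem slices
-- (i, depth, start are Nat: the Python ints are provably nonnegative here; fuel is a
-- totality guard only — cs.length + 1 steps always outlast the loop, which advances i each turn)
def pvLoopA (cs : List Char) : Nat → List String → Nat → Option Nat → Nat → List String
  | 0, templates, _, _, _ => templates
  | fuel + 1, templates, depth, start, i =>
    if i < cs.length then
      let two := PySem.Chars.slice cs (some (i : Int)) (some ((i + 2 : Nat) : Int))
      if two = ['{', '{'] then
        pvLoopA cs fuel templates (depth + 1) (if depth = 0 then some i else start) (i + 2)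
      else if two = ['}', '}'] ∧ 0 < depth then
        if depth - 1 = 0 ∧ start.isSome then
          let block := PySem.Chars.strip (PySem.Chars.slice cs (some ((start.getD 0 : Nat) : Int)) (some ((i + 2 : Nat) : Int)))
          if block ≠ [] then
            pvLoopA cs fuel (templates ++ [String.ofList block]) (depth - 1) none (i + 2)
          else
            pvLoopA cs fuel templates (depth - 1) none (i + 2)
        else
          pvLoopA cs fuel templates (depth - 1) start (i + 2)
      else
        pvLoopA cs fuel templates depth start (i + 1)
    else templates

def extract_top_level_templates (text : String) : List String :=
  dedupe_preserve_order (pvLoopA text.toList (text.toList.length + 1) [] 0 none 0)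

-- ===== PORT B =====
-- inner 'while depth:' loop of Source B: jump between next '}}' (c) and next '{{' (o)
-- (fuel is a totality guard only: j advances by at least 2 per turn, so cs.length + 1 steps outlast the loop)
def pvInnerB (cs : List Char) : Nat → Nat → Nat → Nat × Nat
  | 0, depth, j => (depth, j)
  | fuel + 1, depth, j =>
    if depth = 0 then (depth, j)
    else
      let c := PySem.Chars.findFrom cs ['}', '}'] (j : Int) none
      if c = -1 then (depth, j)
      else
        let o := PySem.Chars.findFrom cs ['{', '{'] (j : Int) none
        if o ≠ -1 ∧ o < c then
          pvInnerB cs fuel (depth + 1) (o.toNat + 2)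
        else
          pvInnerB cs fuel (depth - 1) (c.toNat + 2)

-- outer 'while True:' loop of Source B: find next top-level '{{', match it, slice the block
def pvOuterB (cs : List Char) : Nat → List String → Nat → List String
  | 0, blocks, _ => blocks
  | fuel + 1, blocks, i =>
    let op := PySem.Chars.findFrom cs ['{', '{'] (i : Int) none
    if op = -1 then blocks
    else
      let r := pvInnerB cs (cs.length + 1) 1 (op.toNat + 2)
      if r.1 ≠ 0 then blocks
      else
        pvOuterB cs fuel
          (blocks ++ [String.ofList (PySem.Chars.strip (PySem.Chars.slice cs (some ((op.toNat : Nat) : Int)) (some ((r.2 : Nat) : Int))))])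
          r.2

def extract_top_level_templates_alt (text : String) : List String :=
  PySem.List.dedup (pvOuterB text.toList (text.toList.length + 1) [] 0)

-- ===== PRECONDITION & SPEC =====
def Spec_extract_top_level_templates (text : String) (out : List String) : Prop := out = extract_top_level_templates_alt text
instance (text : String) (out : List String) : Decidable (Spec_extract_top_level_templates text out) := by unfold Spec_extract_top_level_templates; infer_instance

-- ===== CLAIM (what is proved, stated in full; the proofs are below) =====
def Claim_equal_extract_top_level_templates : Prop := ∀ (text : String), Dom_extract_top_level_templates text → Spec_extract_top_level_templates text (extract_top_level_templates text)

-- ===== LEMMAS AND PROOFS =====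

-- text[i:i+2] as drop/take
theorem pv_slice_two (cs : List Char) (i : Nat) :
    PySem.Chars.slice cs (some (i : Int)) (some ((i + 2 : Nat) : Int)) = List.take 2 (List.drop i cs) := by
  have h := PySem.List.slice_natCast (xs := cs) i (i + 2)
  simpa [PySem.Chars.slice] using h

-- a length-2 pattern is a prefix of drop i iff A's two-char slice equals it
theorem pv_prefix_iff_take (cs sub : List Char) (i : Nat) (h2 : sub.length = 2) :
    sub <+: List.drop i cs ↔ List.take 2 (List.drop i cs) = sub := by
  constructor
  · intro h; rw [List.prefix_iff_eq_take] at h; rw [h2] at h; exact h.symm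
  · intro h; rw [← h]; exact List.take_prefix _ _

-- a prefix occurrence at q ≥ i is an infix of drop i
theorem pv_prefix_drop_infix (cs sub : List Char) (i q : Nat) (hq : i ≤ q)
    (hp : sub <+: List.drop q cs) : sub <:+: List.drop i cs := by
  have : List.drop q cs = List.drop (q - i) (List.drop i cs) := by
    rw [List.drop_drop]; congr 1; omega
  rw [this] at hp
  exact hp.isInfix.trans (List.drop_suffix _ _).isInfix

-- text.find(sub, i) = i when sub occurs at i
theorem pv_find_hit (cs sub : List Char) (i : Nat) (h : i ≤ cs.length)
    (hp : sub <+: List.drop i cs) :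
    PySem.Chars.findFrom cs sub (i : Int) none = (i : Int) := by
  have hne : PySem.Chars.findFrom cs sub (i : Int) none ≠ -1 := by
    intro hEq
    rw [PySem.Chars.findFrom_natCast_eq_neg_one_iff cs sub i h] at hEq
    exact hEq hp.isInfix
  obtain ⟨h1, -, h3⟩ := PySem.Chars.findFrom_natCast_spec cs sub i h hne
  by_cases hlt : i < (PySem.Chars.findFrom cs sub (i : Int) none).toNat
  · exact absurd hp (h3 i le_rfl hlt)
  · omega

-- text.find(sub, i) skips a position where sub does not occur
theorem pv_find_step (cs sub : List Char) (i : Nat) (h : i < cs.length)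
    (hn : ¬ sub <+: List.drop i cs) :
    PySem.Chars.findFrom cs sub (i : Int) none = PySem.Chars.findFrom cs sub ((i + 1 : Nat) : Int) none := by
  have h1 : i ≤ cs.length := by omega
  have h2 : i + 1 ≤ cs.length := by omega
  have hinfix : sub <:+: List.drop i cs ↔ sub <:+: List.drop (i + 1) cs := by
    constructor
    · intro hI
      have hdrop : List.drop i cs = cs[i] :: List.drop (i + 1) cs := List.drop_eq_getElem_cons h
      rw [hdrop, List.infix_cons_iff] at hI
      rcases hI with hI | hI
      · exact absurd (hdrop ▸ hI) hn
      · exact hI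
    · intro hI
      obtain ⟨s, t, hst⟩ := hI
      have hq : sub <+: List.drop ((i + 1) + s.length) cs := by
        rw [← List.drop_drop, ← hst, List.append_assoc, List.drop_left' rfl]
        exact List.prefix_append sub t
      exact pv_prefix_drop_infix cs sub i ((i + 1) + s.length) (by omega) hq
  by_cases hr : PySem.Chars.findFrom cs sub ((i + 1 : Nat) : Int) none = -1
  · rw [hr, PySem.Chars.findFrom_natCast_eq_neg_one_iff cs sub i h1]
    rw [PySem.Chars.findFrom_natCast_eq_neg_one_iff cs sub (i+1) h2] at hr
    rw [hinfix]; exact hr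
  · obtain ⟨b1, b2, b3⟩ := PySem.Chars.findFrom_natCast_spec cs sub (i+1) h2 hr
    have hne : PySem.Chars.findFrom cs sub (i : Int) none ≠ -1 := by
      intro hEq
      rw [PySem.Chars.findFrom_natCast_eq_neg_one_iff cs sub i h1, hinfix] at hEq
      rw [← PySem.Chars.findFrom_natCast_eq_neg_one_iff cs sub (i+1) h2] at hEq
      exact hr hEq
    obtain ⟨a1, a2, a3⟩ := PySem.Chars.findFrom_natCast_spec cs sub i h1 hne
    set f := PySem.Chars.findFrom cs sub (i : Int) none with hf
    set g := PySem.Chars.findFrom cs sub ((i + 1 : Nat) : Int) none with hg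
    have hfnn : 0 ≤ f := by omega
    have hgnn : 0 ≤ g := by omega
    have hfi : f.toNat ≠ i := fun hEq => hn (hEq ▸ a2)
    have hgle : ¬ (f.toNat < g.toNat) := fun hlt => b3 f.toNat (by omega) hlt a2
    have hfle : ¬ (g.toNat < f.toNat) := fun hlt => a3 g.toNat (by omega) hlt b2
    omega

-- if no '}}' occurs at or after j, A's loop at positive depth emits nothing more
theorem pv_noclose (cs : List Char) :
    ∀ (fuel j : Nat) (tps : List String) (d : Nat) (st : Option Nat),
      0 < d → ¬ ['}', '}'] <:+: List.drop j cs →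
      pvLoopA cs fuel tps d st j = tps := by
  intro fuel
  induction fuel with
  | zero => intro j tps d st hd hno; rfl
  | succ k ih =>
    intro j tps d st hd hno
    by_cases hj : j < cs.length
    case neg => rw [pvLoopA, if_neg hj]
    case pos =>
    have hno2 : ¬ ['}', '}'] <+: List.drop j cs := fun hp => hno hp.isInfix
    have hmono : ∀ m, j ≤ m → ¬ ['}', '}'] <:+: List.drop m cs := by
      intro m hm hI
      obtain ⟨s, t, hst⟩ := hI
      refine hno (pv_prefix_drop_infix cs _ j (m + s.length) (by omega) ?_)
      rw [← List.drop_drop, ← hst, List.append_assoc, List.drop_left' rfl]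
      exact List.prefix_append _ t
    rw [pvLoopA, if_pos hj]
    simp only [pv_slice_two]
    split
    · exact ih (j + 2) tps (d + 1) _ (by omega) (hmono (j + 2) (by omega))
    · split
      · rename_i hcl
        exact absurd ((pv_prefix_iff_take cs ['}', '}'] j rfl).mpr hcl.1) hno2
      · exact ih (j + 1) tps d st hd (hmono (j + 1) (by omega))

-- strip of a list containing a non-space char is nonempty
theorem pv_strip_ne (l : List Char) (c : Char) (hc : c ∈ l)
    (hns : PySem.Chars.isspace c = false) : PySem.Chars.strip l ≠ [] := by
  intro hE
  simp only [PySem.Chars.strip, PySem.Chars.rstrip, PySem.Chars.lstrip] at hE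
  rw [List.reverse_eq_nil_iff, List.dropWhile_eq_nil_iff] at hE
  have hall : ∀ x ∈ List.dropWhile PySem.Chars.isspace l, PySem.Chars.isspace x = true := by
    intro x hx
    exact hE x (by simpa using hx)
  have hl : ∀ x ∈ l, PySem.Chars.isspace x = true := by
    intro x hx
    rw [← List.takeWhile_append_dropWhile (p := PySem.Chars.isspace) (l := l)] at hx
    rcases List.mem_append.mp hx with hx | hx
    · exact List.mem_takeWhile_imp hx
    · exact hall x hx
  rw [hl c hc] at hns; cases hns

-- Python's str.strip() is idempotent
theorem pv_lstrip_of_lstrip_prefix (l : List Char) (h : PySem.Chars.lstrip l = l)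
    (m : List Char) (hp : m <+: l) : PySem.Chars.lstrip m = m := by
  simp only [PySem.Chars.lstrip] at *
  cases m with
  | nil => simp
  | cons a t =>
    obtain ⟨r, hr⟩ := hp
    subst hr
    simp only [List.cons_append] at h
    rw [List.dropWhile_cons] at h ⊢
    split at h
    · exfalso
      have := congrArg List.length h
      simp at this
      have := List.length_dropWhile_le (p := PySem.Chars.isspace) (l := t ++ r)
      simp at this ⊢
      omega
    · simp_all

theorem pv_strip_strip (l : List Char) :
    PySem.Chars.strip (PySem.Chars.strip l) = PySem.Chars.strip l := by
  simp only [PySem.Chars.strip, PySem.Chars.rstrip, PySem.Chars.lstrip] at *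
  set u := List.dropWhile PySem.Chars.isspace l with hu
  have hu' : List.dropWhile PySem.Chars.isspace u = u := List.dropWhile_idempotent _ _
  have hpref : (List.dropWhile PySem.Chars.isspace u.reverse).reverse <+: u := by
    have : List.dropWhile PySem.Chars.isspace u.reverse <:+ u.reverse := List.dropWhile_suffix _
    simpa using this.reverse
  have h1 : List.dropWhile PySem.Chars.isspace (List.dropWhile PySem.Chars.isspace u.reverse).reverse
      = (List.dropWhile PySem.Chars.isspace u.reverse).reverse := by
    have := pv_lstrip_of_lstrip_prefix u (by simpa [PySem.Chars.lstrip] using hu') _ hpref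
    simpa [PySem.Chars.lstrip] using this
  rw [h1]
  simp [List.dropWhile_idempotent]

-- every string A's loop appends is a stripped block
theorem pv_loopA_stripped (cs : List Char) (fuel : Nat) (tps : List String) (d : Nat) (st : Option Nat) (i : Nat)
    (h : ∀ t ∈ tps, PySem.Str.strip t = t) :
    ∀ t ∈ pvLoopA cs fuel tps d st i, PySem.Str.strip t = t := by
  fun_induction pvLoopA
  case case1 => exact h
  case case7 => exact h
  case case3 =>
    rename_i ih
    refine ih ?_
    intro t ht
    rcases List.mem_append.mp ht with h1 | h1
    · exact h t h1
    · simp only [List.mem_singleton] at h1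
      subst h1
      simp only [PySem.Str.strip, String.toList_ofList]
      exact congrArg String.ofList (pv_strip_strip _)
  all_goals (rename_i ih; exact ih h)

theorem pv_dedupe_loop (items : List String) (s : PySem.Set String)
    (h : ∀ t ∈ items, PySem.Str.strip t = t) :
    pvDedupeLoopA items s s = items.foldl PySem.Set.add s := by
  induction items generalizing s with
  | nil => rfl
  | cons a rest ih =>
    have ha : PySem.Str.strip a = a := h a (by simp)
    simp only [pvDedupeLoopA, ha, List.foldl_cons]
    by_cases hc : PySem.Set.contains s a
    · rw [if_pos hc]
      rw [PySem.Set.contains_iff] at hc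
      have hadd : PySem.Set.add s a = s := by simp [PySem.Set.add, hc]
      rw [hadd]
      exact ih s (fun t ht => h t (by simp [ht]))
    · rw [if_neg hc]
      rw [PySem.Set.contains_iff] at hc
      have hadd : PySem.Set.add s a = s ++ [a] := by simp [PySem.Set.add, hc]
      rw [hadd]
      exact ih (s ++ [a]) (fun t ht => h t (by simp [ht]))

-- A's set-based dedupe on stripped items is dict.fromkeys dedup
theorem pv_dedupe_eq_dedup (items : List String) (h : ∀ t ∈ items, PySem.Str.strip t = t) :
    dedupe_preserve_order items = PySem.List.dedup items := by
  unfold dedupe_preserve_order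
  have : (PySem.Set.empty : PySem.Set String) = ([] : List String) := rfl
  rw [this, pv_dedupe_loop items [] h, PySem.List.dedup_eq_ofList, PySem.Set.ofList_eq_foldl]

-- an occurrence of '{{' needs two characters
theorem pv_open_len (cs : List Char) (c1 c2 : Char) (i : Nat) (hp : [c1, c2] <+: List.drop i cs) :
    i + 2 ≤ cs.length := by
  have := hp.length_le
  rw [List.length_drop] at this
  simp at this
  omega

-- '{{' and '}}' cannot both occur at the same position
theorem pv_not_both (l : List Char) (h1 : ['{', '{'] <+: l) (h2 : ['}', '}'] <+: l) : False := by
  obtain ⟨t1, ht1⟩ := h1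
  obtain ⟨t2, ht2⟩ := h2
  rw [← ht1] at ht2
  simp at ht2

-- the '{' that opens a block survives into the sliced block
theorem pv_open_mem_slice (cs : List Char) (p e : Nat) (hp : ['{', '{'] <+: List.drop p cs)
    (he : p + 2 ≤ e) :
    '{' ∈ PySem.Chars.slice cs (some ((p : Nat) : Int)) (some ((e : Nat) : Int)) := by
  have hs := PySem.List.slice_natCast (xs := cs) p e
  rw [show PySem.Chars.slice cs (some ((p : Nat) : Int)) (some ((e : Nat) : Int)) = PySem.List.slice cs (some ((p : Nat) : Int)) (some ((e : Nat) : Int)) from rfl, hs]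
  obtain ⟨t, ht⟩ := hp
  rw [← ht]
  have h2 : 2 ≤ e - p := by omega
  rcases Nat.exists_eq_add_of_le h2 with ⟨k, hk⟩
  rw [hk]
  simp [List.take_cons]

-- pvOuterB ignores a position where '{{' does not occur
theorem pv_outerB_step (cs : List Char) (fuel : Nat) (blocks : List String) (i : Nat) (hi : i < cs.length)
    (hno : ¬ ['{', '{'] <+: List.drop i cs) :
    pvOuterB cs (fuel + 1) blocks i = pvOuterB cs (fuel + 1) blocks (i + 1) := by
  have hf := pv_find_step cs ['{', '{'] i hi hno
  rw [pvOuterB, pvOuterB]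
  simp only [hf]

-- pvInnerB ignores a position where neither brace token occurs
theorem pv_innerB_step (cs : List Char) (fuel d j : Nat) (hj : j < cs.length)
    (hno : ¬ ['{', '{'] <+: List.drop j cs) (hnc : ¬ ['}', '}'] <+: List.drop j cs)
    (hd : d ≠ 0) (hc : PySem.Chars.findFrom cs ['}', '}'] (j : Int) none ≠ -1) :
    pvInnerB cs (fuel + 1) d j = pvInnerB cs (fuel + 1) d (j + 1) := by
  have hfo := pv_find_step cs ['{', '{'] j hj hno
  have hfc := pv_find_step cs ['}', '}'] j hj hnc
  have hc' : PySem.Chars.findFrom cs ['}', '}'] ((j + 1 : Nat) : Int) none ≠ -1 := hfc ▸ hc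
  rw [pvInnerB, pvInnerB]
  simp only [hfo, hfc, if_neg hd, if_neg hc']

-- A's loop is already finished when i has passed the end (any fuel)
theorem pv_loopA_stop (cs : List Char) (fuel : Nat) (tps : List String) (d : Nat)
    (st : Option Nat) (i : Nat) (hi : cs.length ≤ i) :
    pvLoopA cs fuel tps d st i = tps := by
  cases fuel with
  | zero => rfl
  | succ f => rw [pvLoopA, if_neg (by omega)]

-- one-step unfolding equations of the inner loop
theorem pv_innerB_exit0 (cs : List Char) (fuel d j : Nat) (hd : d = 0) :
    pvInnerB cs fuel d j = (d, j) := by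
  cases fuel with
  | zero => rfl
  | succ f => rw [pvInnerB, if_pos hd]

theorem pv_innerB_exit (cs : List Char) (fuel d j : Nat)
    (hcl : PySem.Chars.findFrom cs ['}', '}'] (j : Int) none = -1) :
    pvInnerB cs fuel d j = (d, j) := by
  cases fuel with
  | zero => rfl
  | succ f =>
    by_cases hd : d = 0
    · rw [pvInnerB, if_pos hd]
    · rw [pvInnerB, if_neg hd]
      simp only [if_pos hcl]

theorem pv_innerB_open (cs : List Char) (fuel d j : Nat) (hd : d ≠ 0)
    (hcl : PySem.Chars.findFrom cs ['}', '}'] (j : Int) none ≠ -1)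
    (ho : PySem.Chars.findFrom cs ['{', '{'] (j : Int) none ≠ -1 ∧
      PySem.Chars.findFrom cs ['{', '{'] (j : Int) none < PySem.Chars.findFrom cs ['}', '}'] (j : Int) none) :
    pvInnerB cs (fuel + 1) d j = pvInnerB cs fuel (d + 1) ((PySem.Chars.findFrom cs ['{', '{'] (j : Int) none).toNat + 2) := by
  rw [pvInnerB, if_neg hd]
  simp only [if_neg hcl, if_pos ho]

theorem pv_innerB_close (cs : List Char) (fuel d j : Nat) (hd : d ≠ 0)
    (hcl : PySem.Chars.findFrom cs ['}', '}'] (j : Int) none ≠ -1)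
    (ho : ¬ (PySem.Chars.findFrom cs ['{', '{'] (j : Int) none ≠ -1 ∧
      PySem.Chars.findFrom cs ['{', '{'] (j : Int) none < PySem.Chars.findFrom cs ['}', '}'] (j : Int) none)) :
    pvInnerB cs (fuel + 1) d j = pvInnerB cs fuel (d - 1) ((PySem.Chars.findFrom cs ['}', '}'] (j : Int) none).toNat + 2) := by
  rw [pvInnerB, if_neg hd]
  simp only [if_neg hcl, if_neg ho]

-- the find-jump simulation: A's scan = B's outer/inner loops, by strong induction on the index
-- (all fuels beyond the stated sufficiency bounds compute the same values)
theorem pv_main (cs : List Char) : ∀ (n : Nat),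
    (∀ (fA fB i : Nat) (tps : List String), i ≤ cs.length → cs.length - i < fA →
      cs.length - i < fB → cs.length - i ≤ n →
      pvLoopA cs fA tps 0 none i = pvOuterB cs fB tps i) ∧
    (∀ (fA fI fO j d p : Nat) (tps : List String), j ≤ cs.length → cs.length - j < fA →
      cs.length - j < fI → cs.length - j < fO → cs.length - j ≤ n → 0 < d →
      ['{', '{'] <+: List.drop p cs → p + 2 ≤ j →
      pvLoopA cs fA tps d (some p) j =
        (if (pvInnerB cs fI d j).1 ≠ 0 then tps
         else pvOuterB cs fO
           (tps ++ [String.ofList (PySem.Chars.strip (PySem.Chars.slice cs (some ((p : Nat) : Int)) (some (((pvInnerB cs fI d j).2 : Nat) : Int))))])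
           (pvInnerB cs fI d j).2)) := by
  intro n
  induction n with
  | zero =>
    refine ⟨?_, ?_⟩
    · intro fA fB i tps h hfa hfb hk
      have hop : PySem.Chars.findFrom cs ['{', '{'] (i : Int) none = -1 := by
        rw [PySem.Chars.findFrom_natCast_eq_neg_one_iff cs _ i h]
        rw [List.drop_eq_nil_of_le (by omega)]
        simp
      obtain ⟨f, rfl⟩ : ∃ f, fB = f + 1 := ⟨fB - 1, by omega⟩
      rw [pv_loopA_stop cs fA tps 0 none i (by omega), pvOuterB]
      simp only [if_pos hop]
    · intro fA fI fO j d p tps h hfa hfi hfo hk hd hp hpj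
      have hcl : PySem.Chars.findFrom cs ['}', '}'] (j : Int) none = -1 := by
        rw [PySem.Chars.findFrom_natCast_eq_neg_one_iff cs _ j h]
        rw [List.drop_eq_nil_of_le (by omega)]
        simp
      rw [pv_loopA_stop cs fA tps d (some p) j (by omega)]
      simp only [pv_innerB_exit cs fI d j hcl]
      rw [if_pos (show ((d, j) : Nat × Nat).1 ≠ 0 by simp; omega)]
  | succ n ihn =>
    obtain ⟨ih1, ih2⟩ := ihn
    refine ⟨?_, ?_⟩
    · -- S1: depth-0 scanning = outer loop
      intro fA fB i tps h hfa hfb hk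
      by_cases hi : i < cs.length
      case neg =>
        have hop : PySem.Chars.findFrom cs ['{', '{'] (i : Int) none = -1 := by
          rw [PySem.Chars.findFrom_natCast_eq_neg_one_iff cs _ i h]
          rw [List.drop_eq_nil_of_le (by omega)]
          simp
        obtain ⟨f, rfl⟩ : ∃ f, fB = f + 1 := ⟨fB - 1, by omega⟩
        rw [pv_loopA_stop cs fA tps 0 none i (by omega), pvOuterB]
        simp only [if_pos hop]
      case pos =>
      obtain ⟨fa, rfl⟩ : ∃ f, fA = f + 1 := ⟨fA - 1, by omega⟩
      obtain ⟨fb, rfl⟩ : ∃ f, fB = f + 1 := ⟨fB - 1, by omega⟩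
      by_cases hop : ['{', '{'] <+: List.drop i cs
      · -- '{{' at i: open a block in both
        have htake := (pv_prefix_iff_take cs _ i rfl).mp hop
        have h2 : i + 2 ≤ cs.length := pv_open_len cs _ _ i hop
        have hfind := pv_find_hit cs _ i h hop
        have hne : PySem.Chars.findFrom cs ['{', '{'] (i : Int) none ≠ -1 := by
          rw [hfind]; omega
        rw [pvLoopA, if_pos hi]
        simp only [pv_slice_two]
        rw [if_pos htake]
        show pvLoopA cs fa tps 1 (some i) (i + 2) = pvOuterB cs (fb + 1) tps i
        rw [ih2 fa (cs.length + 1) fb (i + 2) 1 i tps h2 (by omega) (by omega) (by omega) (by omega) (by omega) hop (by omega)]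
        conv_rhs => rw [pvOuterB]
        simp only [hfind, Int.toNat_natCast]
        rw [if_neg (show ¬ ((i : Int) = -1) by omega)]
      · -- no '{{' at i: A advances one char, B's find skips it
        rw [pvLoopA, if_pos hi]
        simp only [pv_slice_two]
        rw [if_neg (fun hEq => hop ((pv_prefix_iff_take cs _ i rfl).mpr hEq))]
        rw [if_neg (by rintro ⟨-, h0⟩; omega)]
        rw [ih1 fa (fb + 1) (i + 1) tps (by omega) (by omega) (by omega) (by omega)]
        exact (pv_outerB_step cs fb tps i hi hop).symm
    · -- S2: positive-depth scanning = inner loop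
      intro fA fI fO j d p tps h hfa hfi hfo hk hd hp hpj
      by_cases hj : j < cs.length
      case neg =>
        have hcl : PySem.Chars.findFrom cs ['}', '}'] (j : Int) none = -1 := by
          rw [PySem.Chars.findFrom_natCast_eq_neg_one_iff cs _ j h]
          rw [List.drop_eq_nil_of_le (by omega)]
          simp
        rw [pv_loopA_stop cs fA tps d (some p) j (by omega)]
        simp only [pv_innerB_exit cs fI d j hcl]
        rw [if_pos (show ((d, j) : Nat × Nat).1 ≠ 0 by simp; omega)]
      case pos =>
      by_cases hcl : PySem.Chars.findFrom cs ['}', '}'] (j : Int) none = -1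
      · -- no '}}' at or after j: A emits nothing more, B's inner loop exits unmatched
        have hno : ¬ ['}', '}'] <:+: List.drop j cs :=
          (PySem.Chars.findFrom_natCast_eq_neg_one_iff cs _ j h).mp hcl
        rw [pv_noclose cs fA j tps d (some p) hd hno]
        simp only [pv_innerB_exit cs fI d j hcl]
        rw [if_pos (show ((d, j) : Nat × Nat).1 ≠ 0 by simp; omega)]
      · obtain ⟨fa, rfl⟩ : ∃ f, fA = f + 1 := ⟨fA - 1, by omega⟩
        obtain ⟨fi, rfl⟩ : ∃ f, fI = f + 1 := ⟨fI - 1, by omega⟩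
        obtain ⟨c1, c2, -⟩ := PySem.Chars.findFrom_natCast_spec cs ['}', '}'] j h hcl
        by_cases hob : ['{', '{'] <+: List.drop j cs
        · -- '{{' at j: depth increases in both
          have hfind := pv_find_hit cs _ j h hob
          have h2 : j + 2 ≤ cs.length := pv_open_len cs _ _ j hob
          have hcnj : (PySem.Chars.findFrom cs ['}', '}'] (j : Int) none).toNat ≠ j := by
            intro hEq
            exact pv_not_both _ hob (hEq ▸ c2)
          have hoc : PySem.Chars.findFrom cs ['{', '{'] (j : Int) none <
              PySem.Chars.findFrom cs ['}', '}'] (j : Int) none := by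
            rw [hfind]; omega
          have hEq := pv_innerB_open cs fi d j (by omega) hcl ⟨by rw [hfind]; omega, hoc⟩
          simp only [hfind, Int.toNat_natCast] at hEq
          have hclen : j + 2 ≤ (PySem.Chars.findFrom cs ['}', '}'] (j : Int) none).toNat + 2 := by
            omega
          have htake := (pv_prefix_iff_take cs _ j rfl).mp hob
          rw [pvLoopA, if_pos hj]
          simp only [pv_slice_two]
          rw [if_pos htake, if_neg (by omega : ¬ d = 0)]
          rw [ih2 fa fi fO (j + 2) (d + 1) p tps h2 (by omega) (by omega) (by omega) (by omega) (by omega) hp (by omega)]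
          simp only [hEq]
        · by_cases hcb : ['}', '}'] <+: List.drop j cs
          · -- '}}' at j: depth decreases in both
            have hfc := pv_find_hit cs _ j h hcb
            have h2 : j + 2 ≤ cs.length := pv_open_len cs _ _ j hcb
            have hnot : ¬ (PySem.Chars.findFrom cs ['{', '{'] (j : Int) none ≠ -1 ∧
                PySem.Chars.findFrom cs ['{', '{'] (j : Int) none <
                  PySem.Chars.findFrom cs ['}', '}'] (j : Int) none) := by
              rintro ⟨ho1, ho2⟩
              obtain ⟨a1, a2, -⟩ := PySem.Chars.findFrom_natCast_spec cs ['{', '{'] j h ho1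
              have honj : (PySem.Chars.findFrom cs ['{', '{'] (j : Int) none).toNat ≠ j := by
                intro hEq
                exact pv_not_both _ (hEq ▸ a2) hcb
              rw [hfc] at ho2
              omega
            have hEq := pv_innerB_close cs fi d j (by omega) hcl hnot
            simp only [hfc, Int.toNat_natCast] at hEq
            have htake := (pv_prefix_iff_take cs _ j rfl).mp hcb
            rw [pvLoopA, if_pos hj]
            simp only [pv_slice_two]
            rw [if_neg (by rw [htake]; simp), if_pos ⟨htake, hd⟩]
            by_cases hd1 : d - 1 = 0
            · -- matching close of the top-level block: emit it, resume outer scan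
              rw [if_pos ⟨hd1, rfl⟩]
              simp only [Option.getD_some]
              rw [if_pos (pv_strip_ne _ '{' (pv_open_mem_slice cs p (j + 2) hp (by omega)) (by decide))]
              rw [hd1]
              rw [ih1 fa fO (j + 2) _ h2 (by omega) (by omega) (by omega)]
              simp only [hEq, pv_innerB_exit0 cs fi (d - 1) (j + 2) hd1]
              rw [if_neg (by simp [hd1])]
            · rw [if_neg (fun hpair => hd1 hpair.1)]
              rw [ih2 fa fi fO (j + 2) (d - 1) p tps h2 (by omega) (by omega) (by omega) (by omega) (by omega) hp (by omega)]
              simp only [hEq]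
          · -- neither token at j: both skip the character
            rw [pvLoopA, if_pos hj]
            simp only [pv_slice_two]
            rw [if_neg (fun hEq => hob ((pv_prefix_iff_take cs _ j rfl).mpr hEq))]
            rw [if_neg (fun hpair => hcb ((pv_prefix_iff_take cs _ j rfl).mpr hpair.1))]
            rw [ih2 fa (fi + 1) fO (j + 1) d p tps (by omega) (by omega) (by omega) (by omega) (by omega) hd hp (by omega)]
            rw [pv_innerB_step cs fi d j hj hob hcb (by omega) hcl]

-- ===== VERDICT (by name: the statement is the Claim_ definition above) =====
theorem extract_top_level_templates_spec : Claim_equal_extract_top_level_templates := by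
  intro text _
  unfold Spec_extract_top_level_templates extract_top_level_templates extract_top_level_templates_alt
  rw [← (pv_main text.toList text.toList.length).1 (text.toList.length + 1) (text.toList.length + 1) 0 [] (Nat.zero_le _) (by omega) (by omega) (by omega)]
  exact pv_dedupe_eq_dedup _ (pv_loopA_stripped text.toList (text.toList.length + 1) [] 0 none 0 (by simp))
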